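-- pv_equiv track=rewrite | github.com/anonymous-paper-repos/Mixture-of-Accent-Adapters | dhf.py | find_best_consecutive_repeat
-- ===== SOURCE A (Python) =====
-- from typing import Dict, List, Tuple
--
-- def find_best_consecutive_repeat(tokens: List[str], min_k=2, max_k=16, min_reps=3):
--     n = len(tokens)
--     best = None
--     for start in range(n):
--         remaining = n - start
--         max_k_eff = min(max_k, remaining // min_reps)
--         for k in range(min_k, max_k_eff + 1):
--             block = tokens[start:start+k]
--             reps = 1
--             i = start + k
--             while i + k <= n and tokens[i:i+k] == block:
--                 reps += 1
--                 i += k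
--             if reps >= min_reps:
--                 covered = k * reps
--                 cand = (covered, k, -start, start, reps)
--                 if best is None or cand > best:
--                     best = cand
--     if best is None:
--         return None
--     _, k, _, start, reps = best
--     return start, k, reps
-- ===== SOURCE B (Python) =====
-- def find_best_consecutive_repeat(tokens, min_k=2, max_k=16, min_reps=3):
--     n = len(tokens)
--     best = None
--     kmax = min(max_k, n // min_reps)  # no k above n // min_reps can reach min_reps repeats
--     for k in range(min_k, kmax + 1):
--         # rep[s] = number of consecutive copies of tokens[s:s+k] starting at s,
--         # shared right-to-left: rep[s] = rep[s+k] + 1 when the next block matches.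
--         rep = [1] * (n + 1)
--         for s in range(n - 1, -1, -1):
--             if s + 2 * k <= n and tokens[s:s + k] == tokens[s + k:s + 2 * k]:
--                 rep[s] = rep[s + k] + 1
--         for start in range(n):
--             if k <= (n - start) // min_reps:
--                 reps = rep[start]
--                 if reps >= min_reps:
--                     cand = (k * reps, k, -start, start, reps)
--                     if best is None or cand > best:
--                         best = cand
--     if best is None:
--         return None
--     _, k, _, start, reps = best
--     return start, k, reps
-- ===== Notes on version B (the rewrite author's own statement) =====
-- stated objective: faster
-- what changed: A re-scans repeats with a while loop for every (start, k); B caps k at n // min_reps and makes one right-to-left DP pass per k (rep[s] = rep[s+k] + 1 when the next block matches), sharing repeat counts between starts, while keeping A's exact tuple-max tie-breaking.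
-- outside the precondition, e.g. on find_best_consecutive_repeat([], 2, 16, 0): A returns None, B raises ZeroDivisionError; on find_best_consecutive_repeat(['a'], 0, 5, -2): A returns None, B returns None
import Mathlib
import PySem

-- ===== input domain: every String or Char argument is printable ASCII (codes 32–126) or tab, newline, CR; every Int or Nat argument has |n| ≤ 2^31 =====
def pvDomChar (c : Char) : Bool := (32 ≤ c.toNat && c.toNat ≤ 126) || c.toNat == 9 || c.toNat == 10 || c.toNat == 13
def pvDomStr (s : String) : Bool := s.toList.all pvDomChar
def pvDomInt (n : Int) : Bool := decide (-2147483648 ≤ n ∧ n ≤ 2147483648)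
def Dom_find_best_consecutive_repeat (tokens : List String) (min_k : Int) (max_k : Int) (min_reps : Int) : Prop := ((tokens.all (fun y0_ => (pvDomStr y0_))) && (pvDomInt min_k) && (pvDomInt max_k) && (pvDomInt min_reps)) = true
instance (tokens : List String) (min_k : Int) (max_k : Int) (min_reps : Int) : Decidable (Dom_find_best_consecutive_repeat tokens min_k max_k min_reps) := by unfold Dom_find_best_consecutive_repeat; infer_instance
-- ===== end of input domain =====

-- B replaces A's per-start rescanning while-loop by one right-to-left DP pass per k
-- (rep[s] = rep[s+k] + 1 when the next block matches), sharing repeat counts between starts.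

-- ===== PORT A =====
-- Python tuple '>' on the 5-tuple candidates (lexicographic), shared by both ports.
def pvGt (a b : Int × Int × Int × Int × Int) : Bool :=
  decide (b.1 < a.1) || (decide (a.1 = b.1) &&
    (decide (b.2.1 < a.2.1) || (decide (a.2.1 = b.2.1) &&
      (decide (b.2.2.1 < a.2.2.1) || (decide (a.2.2.1 = b.2.2.1) &&
        (decide (b.2.2.2.1 < a.2.2.2.1) || (decide (a.2.2.2.1 = b.2.2.2.1) &&
          decide (b.2.2.2.2 < a.2.2.2.2))))))))

-- 'if best is None or cand > best: best = cand', shared by both ports.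
def pvUpd (best : Option (Int × Int × Int × Int × Int)) (c : Int × Int × Int × Int × Int) :
    Option (Int × Int × Int × Int × Int) :=
  match best with
  | none => some c
  | some b => if pvGt c b then some c else some b

-- A's inner 'while i + k <= n and tokens[i:i+k] == block'; the fuel only makes it total
-- (for k ≥ 1, as guaranteed by Pre_, fuel n+1 is never exhausted).
def pvWhileA (tokens : List String) (n k : Int) (block : List String) :
    Nat → Int → Int → Int
  | 0, _, reps => reps
  | fuel + 1, i, reps =>
    if i + k ≤ n ∧ PySem.List.slice tokens (some i) (some (i + k)) = block then
      pvWhileA tokens n k block fuel (i + k) (reps + 1)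
    else reps

def find_best_consecutive_repeat (tokens : List String) (min_k : Int) (max_k : Int) (min_reps : Int) : Option (Int × Int × Int) :=
  let n : Int := tokens.length
  let best := (PySem.List.pyRange 0 n 1).foldl (fun best start =>
    let remaining := n - start
    let max_k_eff := min max_k (PySem.Int.floordiv remaining min_reps)
    (PySem.List.pyRange min_k (max_k_eff + 1) 1).foldl (fun best k =>
      let block := PySem.List.slice tokens (some start) (some (start + k))
      let reps := pvWhileA tokens n k block (tokens.length + 1) (start + k) 1
      if min_reps ≤ reps then pvUpd best (k * reps, k, -start, start, reps) else best) best) none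
  match best with
  | none => none
  | some (_, k, _, start, reps) => some (start, k, reps)

-- ===== PORT B =====
-- rep = [1]*(n+1); for s in range(n-1,-1,-1): if s+2k<=n and tokens[s:s+k]==tokens[s+k:s+2k]: rep[s]=rep[s+k]+1
-- (pyGetD/pySetD are exact here: whenever the guard holds, 0 ≤ s < s+k ≤ n < len rep).
def pvBuildRep (tokens : List String) (n k : Int) : List Int :=
  (PySem.List.pyRange (n - 1) (-1) (-1)).foldl (fun rep s =>
    if s + 2 * k ≤ n ∧
        PySem.List.slice tokens (some s) (some (s + k)) =
          PySem.List.slice tokens (some (s + k)) (some (s + 2 * k)) then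
      PySem.List.pySetD rep s (PySem.List.pyGetD rep (s + k) 1 + 1)
    else rep) (List.replicate (tokens.length + 1) (1 : Int))

def find_best_consecutive_repeat_alt (tokens : List String) (min_k : Int) (max_k : Int) (min_reps : Int) : Option (Int × Int × Int) :=
  let n : Int := tokens.length
  let kmax := min max_k (PySem.Int.floordiv n min_reps)
  let best := (PySem.List.pyRange min_k (kmax + 1) 1).foldl (fun best k =>
    let rep := pvBuildRep tokens n k
    (PySem.List.pyRange 0 n 1).foldl (fun best start =>
      if k ≤ PySem.Int.floordiv (n - start) min_reps then
        let reps := PySem.List.pyGetD rep start 1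
        if min_reps ≤ reps then pvUpd best (k * reps, k, -start, start, reps) else best
      else best) best) none
  match best with
  | none => none
  | some (_, k, _, start, reps) => some (start, k, reps)

-- ===== PRECONDITION & SPEC =====
-- Pre_ excludes min_reps = 0, on which A raises ZeroDivisionError (except on tokens = [],
-- where A returns None before dividing but B's k-range cap still divides), and min_k ≤ 0
-- with a reachable k-range, on which A's inner while loop never terminates (k ≤ 0 makes i
-- stop advancing past n); the disjuncts tokens = [] and max_k < min_k keep the inputs
-- where those parameters are degenerate but A still returns (the loops run empty).
def Pre_find_best_consecutive_repeat (tokens : List String) (min_k : Int) (max_k : Int) (min_reps : Int) : Prop :=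
  min_reps ≠ 0 ∧ (tokens = [] ∨ 1 ≤ min_k ∨ max_k < min_k)
instance (tokens : List String) (min_k : Int) (max_k : Int) (min_reps : Int) : Decidable (Pre_find_best_consecutive_repeat tokens min_k max_k min_reps) := by unfold Pre_find_best_consecutive_repeat; infer_instance

def pvWitness_find_best_consecutive_repeat : List String × Int × Int × Int :=
  (["a", "b", "a", "b", "a", "b", "c"], 2, 16, 3)

def Spec_find_best_consecutive_repeat (tokens : List String) (min_k : Int) (max_k : Int) (min_reps : Int) (out : Option (Int × Int × Int)) : Prop := out = find_best_consecutive_repeat_alt tokens min_k max_k min_reps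
instance (tokens : List String) (min_k : Int) (max_k : Int) (min_reps : Int) (out : Option (Int × Int × Int)) : Decidable (Spec_find_best_consecutive_repeat tokens min_k max_k min_reps out) := by unfold Spec_find_best_consecutive_repeat; infer_instance

-- ===== CLAIM (what is proved, stated in full; the proofs are below) =====
def Claim_equal_find_best_consecutive_repeat : Prop := ∀ (tokens : List String) (min_k : Int) (max_k : Int) (min_reps : Int), Dom_find_best_consecutive_repeat tokens min_k max_k min_reps → Pre_find_best_consecutive_repeat tokens min_k max_k min_reps → Spec_find_best_consecutive_repeat tokens min_k max_k min_reps (find_best_consecutive_repeat tokens min_k max_k min_reps)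

-- ===== LEMMAS AND PROOFS =====

-- Lexicographic facts about the Python tuple comparison.
lemma pvGt_asymm (a b : Int × Int × Int × Int × Int) (h : pvGt a b = true) : pvGt b a = false := by
  obtain ⟨a1, a2, a3, a4, a5⟩ := a; obtain ⟨b1, b2, b3, b4, b5⟩ := b
  rw [← Bool.not_eq_true]
  simp only [pvGt, Bool.or_eq_true, Bool.and_eq_true, decide_eq_true_eq] at h ⊢
  omega

lemma pvGt_trans (a b c : Int × Int × Int × Int × Int) (h1 : pvGt a b = true)
    (h2 : pvGt b c = true) : pvGt a c = true := by
  obtain ⟨a1, a2, a3, a4, a5⟩ := a; obtain ⟨b1, b2, b3, b4, b5⟩ := b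
  obtain ⟨c1, c2, c3, c4, c5⟩ := c
  simp only [pvGt, Bool.or_eq_true, Bool.and_eq_true, decide_eq_true_eq] at h1 h2 ⊢
  omega

lemma pvGt_total (a b : Int × Int × Int × Int × Int) (h1 : pvGt a b = false)
    (h2 : pvGt b a = false) : a = b := by
  obtain ⟨a1, a2, a3, a4, a5⟩ := a; obtain ⟨b1, b2, b3, b4, b5⟩ := b
  rw [← Bool.not_eq_true] at h1 h2
  simp only [pvGt, Bool.or_eq_true, Bool.and_eq_true, decide_eq_true_eq] at h1 h2
  simp only [Prod.mk.injEq]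
  omega

lemma pvUpd_some (b c : Int × Int × Int × Int × Int) :
    pvUpd (some b) c = if pvGt c b then some c else some b := rfl

lemma pvUpd_comm (b : Option (Int × Int × Int × Int × Int))
    (c d : Int × Int × Int × Int × Int) : pvUpd (pvUpd b c) d = pvUpd (pvUpd b d) c := by
  have key : ∀ u v : Int × Int × Int × Int × Int,
      pvUpd (some u) v = pvUpd (some v) u := by
    intro u v
    rw [pvUpd_some, pvUpd_some]
    cases hvu : pvGt v u <;> cases huv : pvGt u v
    case false.false =>
      simp only [Bool.false_eq_true, ite_false]
      exact congrArg some (pvGt_total u v huv hvu)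
    case false.true => simp
    case true.false => simp
    case true.true =>
      exact absurd huv (by simp [pvGt_asymm _ _ hvu])
  cases b with
  | none => simp only [pvUpd]; exact key c d
  | some x =>
    cases hcx : pvGt c x <;> cases hdx : pvGt d x
    case false.false => simp [pvUpd_some, hcx, hdx]
    case false.true =>
      have hcd : pvGt c d = false := by
        cases h : pvGt c d
        · rfl
        · have := pvGt_trans c d x h hdx; simp_all
      simp [pvUpd_some, hcx, hdx, hcd]
    case true.false =>
      have hdc : pvGt d c = false := by
        cases h : pvGt d c
        · rfl
        · have := pvGt_trans d c x h hcx; simp_all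
      simp [pvUpd_some, hcx, hdx, hdc]
    case true.true =>
      rw [pvUpd_some x c, pvUpd_some x d, if_pos hcx, if_pos hdx]
      exact key c d

-- One fold step over indexed candidates; both ports' loop bodies reduce to it.
def pvStep {α : Type} (w : α → Option (Int × Int × Int × Int × Int))
    (b : Option (Int × Int × Int × Int × Int)) (p : α) : Option (Int × Int × Int × Int × Int) :=
  match w p with
  | some c => pvUpd b c
  | none => b

lemma pvStep_rcomm {α : Type} (w : α → Option (Int × Int × Int × Int × Int))
    (b : Option (Int × Int × Int × Int × Int)) (p q : α) :
    pvStep w (pvStep w b p) q = pvStep w (pvStep w b q) p := by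
  simp only [pvStep]
  cases w p <;> cases w q <;> simp
  exact pvUpd_comm b _ _

-- The reference repeat count: number of consecutive copies of tokens[s:s+k] starting at s.
def repF (tokens : List String) (k : Int) (s : Int) : Int :=
  if h : 1 ≤ k ∧ 0 ≤ s ∧ s + 2 * k ≤ (tokens.length : Int) ∧
      PySem.List.slice tokens (some s) (some (s + k)) =
        PySem.List.slice tokens (some (s + k)) (some (s + 2 * k)) then
    1 + repF tokens k (s + k)
  else 1
termination_by ((tokens.length : Int) - s).toNat
decreasing_by
  obtain ⟨h1, -, h3, -⟩ := h
  omega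

-- A's while loop (compare to the FIRST block) computes repF (adjacent-block recursion):
-- once tokens[s:s+k] = tokens[s+k:s+2k], the fixed comparison block can be shifted one
-- block to the right.
lemma pvWhileA_eq_repF (tokens : List String) (k : Int) (hk : 1 ≤ k) :
    ∀ (fuel : Nat) (s reps : Int), 0 ≤ s → (tokens.length : Int) - s ≤ (fuel : Int) * k →
    pvWhileA tokens tokens.length k (PySem.List.slice tokens (some s) (some (s + k)))
      fuel (s + k) reps = reps + repF tokens k s - 1 := by
  intro fuel
  induction fuel with
  | zero =>
    intro s reps hs hfuel
    norm_num at hfuel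
    rw [repF, dif_neg (by rintro ⟨h1, h2, h3, -⟩; omega)]
    simp [pvWhileA]
  | succ f ih =>
    intro s reps hs hfuel
    have hstep : pvWhileA tokens tokens.length k
        (PySem.List.slice tokens (some s) (some (s + k))) (f + 1) (s + k) reps =
        if (s + k) + k ≤ (tokens.length : Int) ∧
            PySem.List.slice tokens (some (s + k)) (some ((s + k) + k)) =
              PySem.List.slice tokens (some s) (some (s + k)) then
          pvWhileA tokens tokens.length k (PySem.List.slice tokens (some s) (some (s + k)))
            f ((s + k) + k) (reps + 1)
        else reps := rfl
    rw [hstep]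
    have e2 : (s + k) + k = s + 2 * k := by ring
    by_cases hc : (s + k) + k ≤ (tokens.length : Int) ∧
        PySem.List.slice tokens (some (s + k)) (some ((s + k) + k)) =
          PySem.List.slice tokens (some s) (some (s + k))
    · rw [if_pos hc]
      have hguard : 1 ≤ k ∧ 0 ≤ s ∧ s + 2 * k ≤ (tokens.length : Int) ∧
          PySem.List.slice tokens (some s) (some (s + k)) =
            PySem.List.slice tokens (some (s + k)) (some (s + 2 * k)) := by
        refine ⟨hk, hs, by omega, ?_⟩
        rw [← e2]; exact hc.2.symm
      have hblock : PySem.List.slice tokens (some s) (some (s + k)) =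
          PySem.List.slice tokens (some (s + k)) (some ((s + k) + k)) := hc.2.symm
      rw [hblock]
      have hfuel' : (tokens.length : Int) - (s + k) ≤ (f : Int) * k := by
        have he : ((f : Int) + 1) * k = (f : Int) * k + k := by ring
        push_cast at hfuel
        linarith
      rw [ih (s + k) (reps + 1) (by omega) hfuel']
      conv_rhs => rw [repF, dif_pos hguard]
      ring
    · rw [if_neg hc]
      rw [repF, dif_neg (by rintro ⟨-, -, h3, h4⟩; exact hc ⟨by omega, by rw [e2]; exact h4.symm⟩)]
      ring

-- Call-site form (fuel n+1 is always sufficient for k ≥ 1).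
lemma whileA_repF (tokens : List String) (k s : Int) (hk : 1 ≤ k) (hs : 0 ≤ s) :
    pvWhileA tokens tokens.length k (PySem.List.slice tokens (some s) (some (s + k)))
      (tokens.length + 1) (s + k) 1 = repF tokens k s := by
  have h : (tokens.length : Int) - s ≤ ((tokens.length + 1 : Nat) : Int) * k := by
    have h1 : ((tokens.length + 1 : Nat) : Int) * 1 ≤ ((tokens.length + 1 : Nat) : Int) * k :=
      mul_le_mul_of_nonneg_left hk (by positivity)
    push_cast at h1 ⊢
    linarith
  rw [pvWhileA_eq_repF tokens k hk (tokens.length + 1) s 1 hs h]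
  ring

-- Reading a list after a Python in-range assignment.
lemma pyGetD_pySetD_int (xs : List Int) (i j v d : Int) (hi0 : 0 ≤ i) (hi : i < (xs.length : Int))
    (hj0 : 0 ≤ j) (hj : j < (xs.length : Int)) :
    PySem.List.pyGetD (PySem.List.pySetD xs i v) j d =
      if j = i then v else PySem.List.pyGetD xs j d := by
  rw [PySem.List.pySetD_of_nonneg _ _ hi0]
  rw [PySem.List.pyGetD_eq_getElem _ _ hj0 (by simpa using hj)]
  by_cases h : j = i
  · subst h
    rw [if_pos rfl]
    exact List.getElem_set_self (by simp; omega)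
  · rw [if_neg h, List.getElem_set_ne (by omega : i.toNat ≠ j.toNat) _,
      ← PySem.List.pyGetD_eq_getElem _ _ hj0 hj]

-- The right-to-left DP pass of B fills rep[s] with repF.
lemma buildRep_loop (tokens : List String) (k : Int) (hk : 1 ≤ k) :
    ∀ (m : Nat) (a : Int) (r : List Int), a + 1 = (m : Int) → a ≤ (tokens.length : Int) - 1 →
    r.length = tokens.length + 1 →
    (∀ s : Int, a < s → s ≤ (tokens.length : Int) → PySem.List.pyGetD r s 1 = repF tokens k s) →
    (∀ s : Int, 0 ≤ s → s ≤ a → PySem.List.pyGetD r s 1 = 1) →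
    ∀ s : Int, 0 ≤ s → s ≤ (tokens.length : Int) →
      PySem.List.pyGetD ((PySem.List.pyRange a (-1) (-1)).foldl (fun rep s =>
        if s + 2 * k ≤ (tokens.length : Int) ∧
            PySem.List.slice tokens (some s) (some (s + k)) =
              PySem.List.slice tokens (some (s + k)) (some (s + 2 * k)) then
          PySem.List.pySetD rep s (PySem.List.pyGetD rep (s + k) 1 + 1)
        else rep) r) s 1 = repF tokens k s := by
  intro m
  induction m with
  | zero =>
    intro a r ha _ _ h1 _ s hs0 hsn
    have : a = -1 := by omega
    subst this
    rw [PySem.List.pyRange_neg_one_eq_nil (by omega)]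
    exact h1 s (by omega) hsn
  | succ m ih =>
    intro a r ha han hlen h1 h2 s hs0 hsn
    have ha0 : 0 ≤ a := by omega
    have hrlen : (a : Int) < (r.length : Int) := by push_cast [hlen]; omega
    rw [PySem.List.pyRange_neg_one_cons (by omega : (-1 : Int) < a), List.foldl_cons]
    set r' := (if a + 2 * k ≤ (tokens.length : Int) ∧
        PySem.List.slice tokens (some a) (some (a + k)) =
          PySem.List.slice tokens (some (a + k)) (some (a + 2 * k)) then
      PySem.List.pySetD r a (PySem.List.pyGetD r (a + k) 1 + 1)
    else r) with hr'
    have hlen' : r'.length = tokens.length + 1 := by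
      rw [hr']; split
      · rw [PySem.List.length_pySetD]; exact hlen
      · exact hlen
    refine ih (a - 1) r' (by omega) (by omega) hlen' ?_ ?_ s hs0 hsn
    · -- values above a-1 are repF
      intro t hta htn
      by_cases hta' : t = a
      · subst hta'
        rw [hr']
        by_cases hcond : t + 2 * k ≤ (tokens.length : Int) ∧
            PySem.List.slice tokens (some t) (some (t + k)) =
              PySem.List.slice tokens (some (t + k)) (some (t + 2 * k))
        · rw [if_pos hcond]
          rw [pyGetD_pySetD_int r t t _ 1 ha0 hrlen ha0 hrlen, if_pos rfl]
          rw [h1 (t + k) (by omega) (by omega)]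
          conv_rhs => rw [repF, dif_pos ⟨hk, ha0, hcond.1, hcond.2⟩]
          ring
        · rw [if_neg hcond]
          rw [h2 t ha0 (le_refl _), repF, dif_neg (by rintro ⟨-, -, h3, h4⟩; exact hcond ⟨h3, h4⟩)]
      · -- t > a: untouched by the assignment at a
        have hval : PySem.List.pyGetD r' t 1 = PySem.List.pyGetD r t 1 := by
          rw [hr']; split
          · rw [pyGetD_pySetD_int r a t _ 1 ha0 hrlen (by omega) (by push_cast [hlen]; omega),
              if_neg hta']
          · rfl
        rw [hval]
        exact h1 t (by omega) htn
    · -- values at or below a-1 are still 1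
      intro t ht0 hta
      have hval : PySem.List.pyGetD r' t 1 = PySem.List.pyGetD r t 1 := by
        rw [hr']; split
        · rw [pyGetD_pySetD_int r a t _ 1 ha0 hrlen ht0 (by push_cast [hlen]; omega),
            if_neg (by omega)]
        · rfl
      rw [hval]
      exact h2 t ht0 (by omega)

lemma buildRep_getD (tokens : List String) (k s : Int) (hk : 1 ≤ k) (hs0 : 0 ≤ s)
    (hsn : s ≤ (tokens.length : Int)) :
    PySem.List.pyGetD (pvBuildRep tokens tokens.length k) s 1 = repF tokens k s := by
  unfold pvBuildRep
  refine buildRep_loop tokens k hk tokens.length ((tokens.length : Int) - 1)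
    (List.replicate (tokens.length + 1) 1) (by omega) (by omega) (by simp) ?_ ?_ s hs0 hsn
  · intro t hta htn
    rw [PySem.List.pyGetD_eq_getElem _ _ (by omega) (by simp; omega),
      List.getElem_replicate, repF, dif_neg (by rintro ⟨h1, -, h3, -⟩; omega)]
  · intro t ht0 hta
    rw [PySem.List.pyGetD_eq_getElem _ _ ht0 (by simp; omega), List.getElem_replicate]

-- The candidate (or nothing) that position (start, k) contributes, expressed with repF.
def pvCandOf (tokens : List String) (min_reps : Int) (p : Int × Int) :
    Option (Int × Int × Int × Int × Int) :=
  if p.2 ≤ PySem.Int.floordiv ((tokens.length : Int) - p.1) min_reps then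
    if min_reps ≤ repF tokens p.2 p.1 then
      some (p.2 * repF tokens p.2 p.1, p.2, -p.1, p.1, repF tokens p.2 p.1)
    else none
  else none

-- k-ranges: A's per-start truncated range is the filtered full range.
lemma pyRange_filter_le (a b d : Int) :
    PySem.List.pyRange a (min b d + 1) 1 =
      (PySem.List.pyRange a (b + 1) 1).filter (fun x => decide (x ≤ d)) := by
  by_cases hba : b + 1 ≤ a
  · rw [PySem.List.pyRange_one_eq_nil hba, PySem.List.pyRange_one_eq_nil (by omega)]
    simp
  · by_cases hdb : b ≤ d
    · have : min b d = b := by omega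
      rw [this, Eq.comm, List.filter_eq_self]
      intro x hx
      rw [PySem.List.mem_pyRange_one] at hx
      simp; omega
    · have hmin : min b d = d := by omega
      rw [hmin]
      by_cases hda : d + 1 ≤ a
      · rw [PySem.List.pyRange_one_eq_nil hda, Eq.comm, List.filter_eq_nil_iff]
        intro x hx
        rw [PySem.List.mem_pyRange_one] at hx
        simp; omega
      · rw [PySem.List.pyRange_one_append a (d + 1) (b + 1) (by omega) (by omega),
          List.filter_append]
        have e1 : (PySem.List.pyRange a (d + 1) 1).filter (fun x => decide (x ≤ d)) =
            PySem.List.pyRange a (d + 1) 1 := by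
          rw [List.filter_eq_self]
          intro x hx
          rw [PySem.List.mem_pyRange_one] at hx
          simp; omega
        have e2 : (PySem.List.pyRange (d + 1) (b + 1) 1).filter (fun x => decide (x ≤ d)) = [] := by
          rw [List.filter_eq_nil_iff]
          intro x hx
          rw [PySem.List.mem_pyRange_one] at hx
          simp; omega
        rw [e1, e2, List.append_nil]

-- Permutation: enumerating (start, k) by start-then-k or by k-then-start.
lemma flatMap_cons_perm {β γ : Type} (l : List β) (x : β → γ) (g : β → List γ) :
    (l.flatMap fun b => x b :: g b).Perm (l.map x ++ l.flatMap g) := by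
  induction l with
  | nil => simp
  | cons b l ih =>
    simp only [List.flatMap_cons, List.map_cons, List.cons_append]
    refine List.Perm.cons _ ?_
    refine (List.Perm.append_left (g b) ih).trans ?_
    rw [← List.append_assoc, ← List.append_assoc]
    exact List.Perm.append_right _ List.perm_append_comm

lemma prod_swap_perm {β γ : Type} (l₁ : List β) (l₂ : List γ) :
    (l₁.flatMap fun a => l₂.map fun b => (a, b)).Perm
      (l₂.flatMap fun b => l₁.map fun a => (a, b)) := by
  induction l₁ with
  | nil => simp
  | cons a l₁ ih =>
    simp only [List.flatMap_cons]
    refine (List.Perm.append_left _ ih).trans ?_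
    exact (flatMap_cons_perm l₂ (fun b => (a, b)) (fun b => l₁.map fun a => (a, b))).symm

-- A's nested loops, flattened onto the canonical (start, k) candidate fold.
lemma foldA_eq (tokens : List String) (min_k max_k min_reps : Int) (hk1 : 1 ≤ min_k) :
    ((PySem.List.pyRange 0 (tokens.length : Int) 1).foldl (fun best start =>
      (PySem.List.pyRange min_k
          (min max_k (PySem.Int.floordiv ((tokens.length : Int) - start) min_reps) + 1) 1).foldl
        (fun best k =>
          if min_reps ≤ pvWhileA tokens (tokens.length : Int) k
              (PySem.List.slice tokens (some start) (some (start + k)))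
              (tokens.length + 1) (start + k) 1 then
            pvUpd best (k * pvWhileA tokens (tokens.length : Int) k
                (PySem.List.slice tokens (some start) (some (start + k)))
                (tokens.length + 1) (start + k) 1, k, -start, start,
              pvWhileA tokens (tokens.length : Int) k
                (PySem.List.slice tokens (some start) (some (start + k)))
                (tokens.length + 1) (start + k) 1)
          else best) best) none)
    = ((PySem.List.pyRange 0 (tokens.length : Int) 1).flatMap (fun s =>
        (PySem.List.pyRange min_k (max_k + 1) 1).map (fun kk => (s, kk)))).foldl
        (pvStep (pvCandOf tokens min_reps)) none := by
  simp only [List.foldl_flatMap, List.foldl_map]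
  apply PySem.List.foldl_congr_mem
  intro b s hs
  rw [PySem.List.mem_pyRange_one] at hs
  rw [pyRange_filter_le min_k max_k (PySem.Int.floordiv ((tokens.length : Int) - s) min_reps),
    List.foldl_filter]
  apply PySem.List.foldl_congr_mem
  intro b' k hkmem
  rw [PySem.List.mem_pyRange_one] at hkmem
  rw [whileA_repF tokens k s (by omega) (by omega)]
  simp only [pvStep, pvCandOf, decide_eq_true_eq]
  split_ifs <;> rfl

-- Dropped k values (k > n // min_reps) contribute no candidate at any start.
lemma candOf_none (tokens : List String) (min_reps k s : Int) (hm : min_reps ≠ 0) (hk : 1 ≤ k)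
    (hbig : ¬ k ≤ PySem.Int.floordiv (tokens.length : Int) min_reps)
    (hs0 : 0 ≤ s) (hsn : s ≤ (tokens.length : Int)) :
    pvCandOf tokens min_reps (s, k) = none := by
  unfold pvCandOf
  rw [if_neg ?hng]
  case hng =>
    show ¬ k ≤ PySem.Int.floordiv ((tokens.length : Int) - s) min_reps
    rcases lt_or_gt_of_ne hm with hneg | hpos
    · -- negative min_reps: the floor division of a nonnegative numerator is ≤ 0 < k
      intro hle
      have hd := PySem.Int.floordiv_mul_add_mod ((tokens.length : Int) - s) min_reps
      have hb := PySem.Int.mod_neg_bounds ((tokens.length : Int) - s) hneg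
      have h1 : 0 ≤ PySem.Int.floordiv ((tokens.length : Int) - s) min_reps * min_reps := by
        omega
      have h2 : PySem.Int.floordiv ((tokens.length : Int) - s) min_reps ≤ 0 := by
        rcases le_or_gt (PySem.Int.floordiv ((tokens.length : Int) - s) min_reps) 0 with h | h
        · exact h
        · have := mul_neg_of_pos_of_neg h hneg
          omega
      omega
    · -- positive min_reps: floor division is monotone in the numerator
      intro hle
      rw [PySem.Int.floordiv_eq_ediv_of_pos hpos] at hle
      rw [PySem.Int.floordiv_eq_ediv_of_pos hpos] at hbig
      have := Int.ediv_le_ediv hpos (show (tokens.length : Int) - s ≤ (tokens.length : Int) by omega)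
      omega

-- B's nested loops (k outer, capped k-range), flattened onto the same canonical fold via
-- the product-swap permutation and commutativity of the best-update.
lemma foldB_eq (tokens : List String) (min_k max_k min_reps : Int) (hk1 : 1 ≤ min_k)
    (hm : min_reps ≠ 0) :
    ((PySem.List.pyRange min_k
        (min max_k (PySem.Int.floordiv (tokens.length : Int) min_reps) + 1) 1).foldl (fun best k =>
      (PySem.List.pyRange 0 (tokens.length : Int) 1).foldl (fun best start =>
        if k ≤ PySem.Int.floordiv ((tokens.length : Int) - start) min_reps then
          if min_reps ≤ PySem.List.pyGetD (pvBuildRep tokens (tokens.length : Int) k) start 1 then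
            pvUpd best (k * PySem.List.pyGetD (pvBuildRep tokens (tokens.length : Int) k) start 1,
              k, -start, start,
              PySem.List.pyGetD (pvBuildRep tokens (tokens.length : Int) k) start 1)
          else best
        else best) best) none)
    = ((PySem.List.pyRange 0 (tokens.length : Int) 1).flatMap (fun s =>
        (PySem.List.pyRange min_k (max_k + 1) 1).map (fun kk => (s, kk)))).foldl
        (pvStep (pvCandOf tokens min_reps)) none := by
  have hperm := prod_swap_perm (PySem.List.pyRange 0 (tokens.length : Int) 1)
    (PySem.List.pyRange min_k (max_k + 1) 1)
  rw [@List.Perm.foldl_eq _ _ (pvStep (pvCandOf tokens min_reps)) _ _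
    ⟨fun b p q => pvStep_rcomm _ b p q⟩ hperm none]
  simp only [List.foldl_flatMap, List.foldl_map]
  rw [pyRange_filter_le min_k max_k (PySem.Int.floordiv (tokens.length : Int) min_reps),
    List.foldl_filter]
  apply PySem.List.foldl_congr_mem
  intro b k hkmem
  rw [PySem.List.mem_pyRange_one] at hkmem
  by_cases hcap : k ≤ PySem.Int.floordiv (tokens.length : Int) min_reps
  · rw [if_pos (by simpa using hcap)]
    apply PySem.List.foldl_congr_mem
    intro b' s hs
    rw [PySem.List.mem_pyRange_one] at hs
    rw [buildRep_getD tokens k s (by omega) (by omega) (by omega)]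
    simp only [pvStep, pvCandOf]
    split_ifs <;> rfl
  · rw [if_neg (by simpa using hcap)]
    rw [PySem.List.foldl_congr_mem _ _ (fun b _ => b) b ?hnone, List.foldl_fixed]
    case hnone =>
      intro acc s hsmem
      rw [PySem.List.mem_pyRange_one] at hsmem
      simp only [pvStep,
        candOf_none tokens min_reps k s hm (by omega) hcap (by omega) (by omega)]

-- The two ports agree whenever 1 ≤ min_k (min_reps plays no special role here:
-- both ports gate candidates by the same floor-division bound).
lemma main_eq (tokens : List String) (min_k max_k min_reps : Int) (hk1 : 1 ≤ min_k)
    (hm : min_reps ≠ 0) :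
    find_best_consecutive_repeat tokens min_k max_k min_reps
      = find_best_consecutive_repeat_alt tokens min_k max_k min_reps := by
  simp only [find_best_consecutive_repeat, find_best_consecutive_repeat_alt]
  rw [foldA_eq tokens min_k max_k min_reps hk1, foldB_eq tokens min_k max_k min_reps hk1 hm]

-- ===== VERDICT (by name: the statement is the Claim_ definition above) =====
theorem find_best_consecutive_repeat_spec : Claim_equal_find_best_consecutive_repeat := by
  intro tokens min_k max_k min_reps _ hpre
  unfold Spec_find_best_consecutive_repeat
  rcases hpre with ⟨hm, hnil | hk1 | hlt⟩
  · -- tokens = []: both loops over starts are empty, both return none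
    subst hnil
    simp [find_best_consecutive_repeat, find_best_consecutive_repeat_alt,
      PySem.List.pyRange_one_eq_nil, List.foldl_fixed]
  · exact main_eq tokens min_k max_k min_reps hk1 hm
  · -- max_k < min_k: every k-range is empty on both sides
    have hksnil : PySem.List.pyRange min_k
        (min max_k (PySem.Int.floordiv (tokens.length : Int) min_reps) + 1) 1 = [] :=
      PySem.List.pyRange_one_eq_nil
        (by have := min_le_left max_k (PySem.Int.floordiv (tokens.length : Int) min_reps); omega)
    have hinner : ∀ s : Int, PySem.List.pyRange min_k
        (min max_k (PySem.Int.floordiv ((tokens.length : Int) - s) min_reps) + 1) 1 = [] :=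
      fun s => PySem.List.pyRange_one_eq_nil
        (by have := min_le_left max_k (PySem.Int.floordiv ((tokens.length : Int) - s) min_reps); omega)
    simp [find_best_consecutive_repeat, find_best_consecutive_repeat_alt, hksnil, hinner,
      List.foldl_fixed]
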